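-- pv_equiv track=rewrite | github.com/rohitkrtiwari/Natural-Language-Processing-CS-5-45 | Word2Vec/CBoW NN Implementation from Scratch.py | create_input_vectors
-- ===== SOURCE A (Python) =====
-- def create_input_vectors(text, vocab, VOCABULARY_SIZE, context_window_size=1):
--     input_vectors = []
--
--     # Loop through each word in the text
--     for i, word in enumerate(text):
--         left_context = []
--         right_context = []
--
--         # Get the left context word (if exists)
--         if i - 1 >= 0:
--             left_context = vocab[text[i - 1]]
--         else:
--             left_context = [0] * VOCABULARY_SIZE  # Add zero vector if no left context
--
--         # Get the right context word (if exists)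
--         if i + 1 < len(text):
--             right_context = vocab[text[i + 1]]
--         else:
--             right_context = [0] * VOCABULARY_SIZE  # Add zero vector if no right context
--
--         # Combine left context and right context to create the input vector
--         input_vector = left_context + right_context
--         input_vectors.append(input_vector)
--
--     return input_vectors
-- ===== SOURCE B (Python) =====
-- def create_input_vectors(text, vocab, VOCABULARY_SIZE, context_window_size=1):
--     if not text:
--         return []
--     zero = [0] * VOCABULARY_SIZE
--     lefts = [zero] + [vocab[w] for w in text[:-1]]
--     rights = [vocab[w] for w in text[1:]] + [zero]
--     return [l + r for l, r in zip(lefts, rights)]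
-- ===== Notes on version B (the rewrite author's own statement) =====
-- stated objective: alternative
-- what changed: Replaces A's per-index boundary branching (enumerate with if i-1>=0 / if i+1<len lookups) by building two zero-padded shifted lookup tables and zipping them into concatenated rows.
import Mathlib
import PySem

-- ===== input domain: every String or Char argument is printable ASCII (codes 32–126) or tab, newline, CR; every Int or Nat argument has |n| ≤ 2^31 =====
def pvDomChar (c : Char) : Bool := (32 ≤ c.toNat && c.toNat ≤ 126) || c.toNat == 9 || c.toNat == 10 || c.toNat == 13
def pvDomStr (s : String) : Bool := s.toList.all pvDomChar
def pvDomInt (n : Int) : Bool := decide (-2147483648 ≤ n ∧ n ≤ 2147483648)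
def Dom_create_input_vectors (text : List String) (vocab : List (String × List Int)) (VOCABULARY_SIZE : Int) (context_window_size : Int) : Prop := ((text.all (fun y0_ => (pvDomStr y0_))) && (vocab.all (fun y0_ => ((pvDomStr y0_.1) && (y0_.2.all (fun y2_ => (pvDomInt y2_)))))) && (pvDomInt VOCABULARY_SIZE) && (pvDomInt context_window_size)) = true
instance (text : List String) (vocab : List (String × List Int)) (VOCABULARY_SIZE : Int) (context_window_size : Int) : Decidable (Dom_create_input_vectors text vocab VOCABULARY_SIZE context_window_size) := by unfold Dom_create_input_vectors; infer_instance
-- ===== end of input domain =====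

-- B replaces the per-index boundary branches by two zero-padded shifted tables zipped together (objective: alternative decomposition, same cost).

-- shared helper: dict lookup vocab[w] (first match), as both Pythons use it
def pvLookup (vocab : List (String × List Int)) (w : String) : Option (List Int) :=
  (vocab.find? (fun p => p.1 == w)).map (·.2)

-- ===== PORT A =====
def create_input_vectors (text : List String) (vocab : List (String × List Int)) (VOCABULARY_SIZE : Int) (context_window_size : Int) : List (List Int) :=
  (PySem.List.enumerate text 0).foldl (fun input_vectors p =>
    let i := p.1
    let left_context : List Int :=
      if i - 1 ≥ 0 then (pvLookup vocab (PySem.List.pyGetD text (i - 1) "")).getD []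
      else PySem.List.pyRepeat [0] VOCABULARY_SIZE
    let right_context : List Int :=
      if i + 1 < (text.length : Int) then (pvLookup vocab (PySem.List.pyGetD text (i + 1) "")).getD []
      else PySem.List.pyRepeat [0] VOCABULARY_SIZE
    input_vectors ++ [left_context ++ right_context]) []

-- ===== PORT B =====
def create_input_vectors_alt (text : List String) (vocab : List (String × List Int)) (VOCABULARY_SIZE : Int) (context_window_size : Int) : List (List Int) :=
  if text = [] then []
  else
    let zero := PySem.List.pyRepeat [0] VOCABULARY_SIZE
    let lefts := zero :: (PySem.List.slice text none (some (-1))).map (fun w => (pvLookup vocab w).getD [])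
    let rights := ((PySem.List.slice text (some 1) none).map (fun w => (pvLookup vocab w).getD [])) ++ [zero]
    (lefts.zip rights).map (fun p => p.1 ++ p.2)

-- ===== PRECONDITION & SPEC =====
-- Pre_ excludes inputs where Python A raises KeyError: with ≥ 2 words, every word of text is looked up in vocab.
def Pre_create_input_vectors (text : List String) (vocab : List (String × List Int)) (VOCABULARY_SIZE : Int) (context_window_size : Int) : Prop :=
  text.length ≤ 1 ∨ ∀ w ∈ text, (pvLookup vocab w).isSome = true
instance (text : List String) (vocab : List (String × List Int)) (VOCABULARY_SIZE : Int) (context_window_size : Int) : Decidable (Pre_create_input_vectors text vocab VOCABULARY_SIZE context_window_size) := by unfold Pre_create_input_vectors; infer_instance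
def pvWitness_create_input_vectors : List String × (List (String × List Int)) × Int × Int :=
  (["a", "b", "a"], [("a", [1, 0]), ("b", [0, 1])], 2, 1)
def Spec_create_input_vectors (text : List String) (vocab : List (String × List Int)) (VOCABULARY_SIZE : Int) (context_window_size : Int) (out : List (List Int)) : Prop := out = create_input_vectors_alt text vocab VOCABULARY_SIZE context_window_size
instance (text : List String) (vocab : List (String × List Int)) (VOCABULARY_SIZE : Int) (context_window_size : Int) (out : List (List Int)) : Decidable (Spec_create_input_vectors text vocab VOCABULARY_SIZE context_window_size out) := by unfold Spec_create_input_vectors; infer_instance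

-- ===== CLAIM (what is proved, stated in full; the proofs are below) =====
def Claim_equal_create_input_vectors : Prop := ∀ (text : List String) (vocab : List (String × List Int)) (VOCABULARY_SIZE : Int) (context_window_size : Int), Dom_create_input_vectors text vocab VOCABULARY_SIZE context_window_size → Pre_create_input_vectors text vocab VOCABULARY_SIZE context_window_size → Spec_create_input_vectors text vocab VOCABULARY_SIZE context_window_size (create_input_vectors text vocab VOCABULARY_SIZE context_window_size)

-- ===== LEMMAS AND PROOFS =====

-- ===== VERDICT (by name: the statement is the Claim_ definition above) =====
theorem create_input_vectors_spec : Claim_equal_create_input_vectors := by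
  intro text vocab V cw _ _
  show create_input_vectors text vocab V cw = create_input_vectors_alt text vocab V cw
  unfold create_input_vectors create_input_vectors_alt
  rw [PySem.List.foldl_append_singleton_eq_map]
  by_cases htext : text = []
  · subst htext; simp [PySem.List.enumerate]
  · rw [if_neg htext]
    have hn : 0 < text.length := List.length_pos_iff.mpr htext
    rw [PySem.List.slice_to_neg_one, PySem.List.slice_from_one]
    apply List.ext_getElem
    · simp [PySem.List.length_enumerate]
      omega
    · intro k h1 h2
      simp only [List.nil_append, List.getElem_map, PySem.List.getElem_enumerate,
        List.getElem_zip, zero_add]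
      have hk : k < text.length := by
        simpa [PySem.List.length_enumerate] using h1
      congr 1
      -- left component
      · rcases Nat.eq_zero_or_pos k with hk0 | hkpos
        · subst hk0
          rw [if_neg (by omega), List.getElem_cons_zero]
        · rw [if_pos (by omega : (0:Int) ≤ (k:Int) - 1)]
          obtain ⟨j, rfl⟩ : ∃ j, k = j + 1 := ⟨k - 1, by omega⟩
          rw [List.getElem_cons_succ]
          rw [PySem.List.pyGetD_eq_getElem text "" (by omega) (by push_cast; omega)]
          simp [List.getElem_dropLast]
      -- right component
      · by_cases hlast : k + 1 = text.length
        · rw [if_neg (by omega)]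
          rw [List.getElem_append_right (by simp; omega)]
          simp
        · rw [if_pos (by omega : (k:Int) + 1 < (text.length:Int))]
          rw [List.getElem_append_left (by simp; omega)]
          rw [PySem.List.pyGetD_eq_getElem text "" (by omega) (by omega)]
          have hidx : (((k : ℕ) : Int) + 1).toNat = k + 1 := by omega
          simp [hidx, List.getElem_tail]
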